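-- pv_equiv track=rewrite | github.com/PavolDado/Advent-of-code | 2016/day7.py | data_creator
-- ===== SOURCE A (Python) =====
-- def data_creator(line):
--     newline = line.replace(']','[')
--     adress_datalist = newline.split('[')
--     outer_data = []
--     inner_data = []
--
--     for i in range(len(adress_datalist)):
--         if i % 2 == 0:
--             outer_data.append(adress_datalist[i])
--         else:
--             inner_data.append(adress_datalist[i])
--     return outer_data, inner_data
-- ===== SOURCE B (Python) =====
-- def data_creator(line):
--     outer_data = []
--     inner_data = []
--     buf = ""
--     on_outer = True
--     for ch in line:
--         if ch == '[' or ch == ']':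
--             (outer_data if on_outer else inner_data).append(buf)
--             on_outer = not on_outer
--             buf = ""
--         else:
--             buf += ch
--     (outer_data if on_outer else inner_data).append(buf)
--     return outer_data, inner_data
-- ===== Notes on version B (the rewrite author's own statement) =====
-- stated objective: simpler
-- what changed: B replaces A's replace-then-split-then-index-parity pipeline with a single character scan that keeps a current-segment buffer and a toggle selecting the active output list.
import Mathlib
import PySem

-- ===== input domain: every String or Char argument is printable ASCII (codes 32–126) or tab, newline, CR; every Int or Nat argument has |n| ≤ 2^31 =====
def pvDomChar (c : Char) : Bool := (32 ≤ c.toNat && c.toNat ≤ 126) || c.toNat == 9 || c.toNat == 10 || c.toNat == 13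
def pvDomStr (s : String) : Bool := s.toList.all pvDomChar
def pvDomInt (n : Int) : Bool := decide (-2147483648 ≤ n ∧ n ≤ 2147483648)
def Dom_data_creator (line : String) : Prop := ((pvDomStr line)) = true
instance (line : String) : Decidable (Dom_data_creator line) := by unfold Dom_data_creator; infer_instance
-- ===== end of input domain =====

-- B replaces A's replace/split/index-parity pipeline with a single character scan
-- keeping a segment buffer and an outer/inner toggle (simpler decomposition, same cost).


-- ===== PORT A =====
-- the `for i in range(len(adress_datalist))` loop: index k, parity branch, appends
def pvLoopA : List String → Nat → List String → List String → List String × List String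
  | [], _, o, i => (o, i)
  | s :: t, k, o, i =>
    if k % 2 == 0 then pvLoopA t (k + 1) (o ++ [s]) i else pvLoopA t (k + 1) o (i ++ [s])

def data_creator (line : String) : List String × List String :=
  let newline := PySem.Str.replace line "]" "["
  let adress_datalist := (PySem.Str.split? newline "[").getD []
  pvLoopA adress_datalist 0 [] []

-- ===== PORT B =====
def data_creator_alt (line : String) : List String × List String :=
  let st := line.toList.foldl
    (fun (st : (List String × List String) × String × Bool) c =>
      if c = '[' ∨ c = ']' then
        ((if st.2.2 then (st.1.1 ++ [st.2.1], st.1.2) else (st.1.1, st.1.2 ++ [st.2.1])),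
          "", !st.2.2)
      else (st.1, st.2.1.push c, st.2.2))
    (([], []), "", true)
  if st.2.2 then (st.1.1 ++ [st.2.1], st.1.2) else (st.1.1, st.1.2 ++ [st.2.1])

-- ===== PRECONDITION & SPEC =====
def Spec_data_creator (line : String) (out : List String × List String) : Prop := out = data_creator_alt line
instance (line : String) (out : List String × List String) : Decidable (Spec_data_creator line out) := by unfold Spec_data_creator; infer_instance

-- ===== CLAIM (what is proved, stated in full; the proofs are below) =====
def Claim_equal_data_creator : Prop := ∀ (line : String), Dom_data_creator line → Spec_data_creator line (data_creator line)

-- ===== LEMMAS AND PROOFS =====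

-- c after line.replace(']','[')
def pvSub (c : Char) : Char := if c = ']' then '[' else c

-- segments of a char list split at '[' (cur = current segment so far, forward order)
def pvSegs : List Char → List Char → List (List Char)
  | [], cur => [cur]
  | c :: t, cur => if c = '[' then cur :: pvSegs t [] else pvSegs t (cur ++ [c])

-- segments split at either bracket
def pvSegs2 : List Char → List Char → List (List Char)
  | [], cur => [cur]
  | c :: t, cur => if c = '[' ∨ c = ']' then cur :: pvSegs2 t [] else pvSegs2 t (cur ++ [c])

-- distribute a list alternately (flag = true ⇒ next goes to the first component)
def pvDist : List String → Bool → List String × List String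
  | [], _ => ([], [])
  | s :: t, flag =>
    let p := pvDist t (!flag)
    if flag then (s :: p.1, p.2) else (p.1, s :: p.2)

lemma pvLoopA_eq (l : List String) : ∀ (k : Nat) (o i : List String),
    pvLoopA l k o i =
      (o ++ (pvDist l (k % 2 == 0)).1, i ++ (pvDist l (k % 2 == 0)).2) := by
  induction l with
  | nil => intro k o i; simp [pvLoopA, pvDist]
  | cons s t ih =>
    intro k o i
    have hpar : ((k + 1) % 2 == 0) = !(k % 2 == 0) := by
      rcases Nat.mod_two_eq_zero_or_one k with h | h <;> simp [Nat.add_mod, h]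
    by_cases hk : k % 2 = 0
    · simp [pvLoopA, pvDist, hk, ih, hpar]
    · simp [pvLoopA, pvDist, hk, ih, hpar]

lemma replace_go_single (l : List Char) : ∀ (fuel : Nat) (acc : List Char), l.length ≤ fuel →
    PySem.Chars.replace.go [']'] ['['] fuel l acc = acc.reverse ++ l.map pvSub := by
  induction l with
  | nil => intro fuel acc _; cases fuel <;> simp [PySem.Chars.replace.go]
  | cons c t ih =>
    intro fuel acc h
    cases fuel with
    | zero => simp at h
    | succ n =>
      simp only [PySem.Chars.replace.go, List.isPrefixOf]
      by_cases hc : c = ']'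
      · simp [hc, ih n _ (by simpa using h), pvSub]
      · have hc' : ¬ (']' = c) := fun h' => hc h'.symm
        simp [hc', hc, ih n _ (by simpa using h), pvSub]

lemma splitOn_go_single (l : List Char) : ∀ (fuel : Nat) (cur : List Char) (acc : List (List Char)),
    l.length ≤ fuel →
    PySem.Chars.splitOn.go ['['] fuel l cur acc = acc.reverse ++ pvSegs l cur.reverse := by
  induction l with
  | nil => intro fuel cur acc _; cases fuel <;> simp [PySem.Chars.splitOn.go, pvSegs]
  | cons c t ih =>
    intro fuel cur acc h
    cases fuel with
    | zero => simp at h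
    | succ n =>
      simp only [PySem.Chars.splitOn.go, List.isPrefixOf]
      by_cases hc : c = '['
      · simp [hc, ih n _ _ (by simpa using h), pvSegs]
      · have hc' : ¬ ('[' = c) := fun h' => hc h'.symm
        simp [hc', hc, ih n _ _ (by simpa using h), pvSegs]

lemma segs_map_sub (cs : List Char) : ∀ cur, pvSegs (cs.map pvSub) cur = pvSegs2 cs cur := by
  induction cs with
  | nil => intro cur; simp [pvSegs, pvSegs2]
  | cons c t ih =>
    intro cur
    by_cases hb : c = '[' ∨ c = ']'
    · have hsub : pvSub c = '[' := by rcases hb with h | h <;> simp [pvSub, h]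
      simp [pvSegs, pvSegs2, hsub, hb, ih]
    · rw [not_or] at hb
      have hsub : pvSub c = c := by simp [pvSub, hb.2]
      simp [pvSegs, pvSegs2, hsub, hb.1, hb.2, ih]

-- A's value as a function of the raw character list
lemma data_creator_char (line : String) :
    data_creator line = pvDist ((pvSegs2 line.toList []).map String.ofList) true := by
  have hrep : (PySem.Str.replace line "]" "[").toList =
      line.toList.map pvSub := by
    simp [PySem.Str.replace, PySem.Chars.replace]
    exact replace_go_single _ _ _ le_rfl
  show pvLoopA ((PySem.Str.split? (PySem.Str.replace line "]" "[") "[").getD []) 0 [] [] = _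
  rw [PySem.Str.split?]
  simp only [PySem.Chars.split?, hrep]
  have hsplit : PySem.Chars.splitOn (line.toList.map pvSub) ['['] =
      pvSegs2 line.toList [] := by
    rw [PySem.Chars.splitOn, splitOn_go_single _ _ _ _ (by simp)]
    simp [segs_map_sub]
  simp [hsplit, pvLoopA_eq]

-- B's fold invariant
lemma fold_alt (cs : List Char) : ∀ (o i : List String) (buf : String) (flag : Bool),
    (let st := cs.foldl
      (fun (st : (List String × List String) × String × Bool) c =>
        if c = '[' ∨ c = ']' then
          ((if st.2.2 then (st.1.1 ++ [st.2.1], st.1.2) else (st.1.1, st.1.2 ++ [st.2.1])),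
            "", !st.2.2)
        else (st.1, st.2.1.push c, st.2.2))
      ((o, i), buf, flag)
     if st.2.2 then (st.1.1 ++ [st.2.1], st.1.2) else (st.1.1, st.1.2 ++ [st.2.1])) =
    (o ++ (pvDist ((pvSegs2 cs buf.toList).map String.ofList) flag).1,
     i ++ (pvDist ((pvSegs2 cs buf.toList).map String.ofList) flag).2) := by
  induction cs with
  | nil =>
    intro o i buf flag
    cases flag <;> simp [pvSegs2, pvDist]
  | cons c t ih =>
    intro o i buf flag
    by_cases hb : c = '[' ∨ c = ']'
    · cases flag <;>
        simp [List.foldl_cons, hb, pvSegs2, pvDist, ih]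
    · have : (c = '[' ∨ c = ']') = False := by simp [hb]
      simp [List.foldl_cons, this, pvSegs2, ih, String.toList_push]

theorem data_creator_eq (line : String) : data_creator line = data_creator_alt line := by
  rw [data_creator_char]
  unfold data_creator_alt
  rw [fold_alt line.toList [] [] "" true]
  simp

-- ===== VERDICT (by name: the statement is the Claim_ definition above) =====
theorem data_creator_spec : Claim_equal_data_creator := by
  intro line _
  unfold Spec_data_creator
  exact data_creator_eq line
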